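-- pv_equiv track=rewrite | github.com/cyrilmori/news_scraping | news_crumbs/compare_nlp.py | find_freq_keywords
-- ===== SOURCE A (Python) =====
-- def find_freq_keywords(keyword_dict):
--     freq_list, word_vector = [], []
--     site_keys = list(keyword_dict.keys())
--     for i_site in range(len(site_keys)):
--         site_name = site_keys[i_site]
--         for w in keyword_dict[site_name]:
--             i_vector = -1
--             if not w in word_vector:
--                 word_vector.append(w)
--                 freq_list.append([0]*len(site_keys))
--             else:
--                 i_vector = word_vector.index(w)
--             freq_list[i_vector][i_site] += 1
--     return freq_list, word_vector
-- ===== SOURCE B (Python) =====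
-- def find_freq_keywords(keyword_dict):
--     site_keys = list(keyword_dict.keys())
--     n = len(site_keys)
--     word_vector = []
--     table = {}  # word -> {site_index: count}, sparse
--     for i, site in enumerate(site_keys):
--         for w in keyword_dict[site]:
--             if w not in table:
--                 word_vector.append(w)
--                 table[w] = {}
--             table[w][i] = table[w].get(i, 0) + 1
--     freq_list = [[table[w].get(i, 0) for i in range(n)] for w in word_vector]
--     return freq_list, word_vector
-- ===== Notes on version B (the rewrite author's own statement) =====
-- stated objective: alternative
-- what changed: B replaces A's incrementally grown dense matrix with repeated word_vector.index scans by a one-pass sparse dict-of-dicts (word -> {site_index: count}) followed by a separate densifying comprehension that materialises the matrix.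
import Mathlib
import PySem

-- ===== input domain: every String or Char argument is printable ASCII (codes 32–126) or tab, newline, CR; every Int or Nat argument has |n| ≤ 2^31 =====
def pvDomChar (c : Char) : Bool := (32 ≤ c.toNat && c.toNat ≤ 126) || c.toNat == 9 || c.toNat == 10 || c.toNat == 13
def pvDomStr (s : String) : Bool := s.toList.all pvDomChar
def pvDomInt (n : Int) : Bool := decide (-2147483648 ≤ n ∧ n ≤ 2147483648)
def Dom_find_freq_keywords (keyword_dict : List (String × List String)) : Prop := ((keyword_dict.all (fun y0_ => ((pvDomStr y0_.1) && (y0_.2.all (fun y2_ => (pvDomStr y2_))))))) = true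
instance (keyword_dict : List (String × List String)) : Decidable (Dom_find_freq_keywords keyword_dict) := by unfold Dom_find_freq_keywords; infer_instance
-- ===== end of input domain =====

-- B replaces A's incrementally grown dense matrix (with its repeated word_vector.index scans)
-- by a sparse dict-of-dicts word -> {site_index: count} built in one pass, densified afterwards;
-- objective: alternative decomposition (no speed claim).

-- ===== PORT A =====
-- Python `freq_list[i_vector][i_site] += 1` with Python (possibly negative) indexing;
-- indices are always in range in this program, the `none` fallbacks are never taken.
def faBump (freq : List (List Int)) (i_vector i_site : Int) : List (List Int) :=
  match PySem.List.pyIdx? freq.length i_vector with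
  | some k => freq.modify k (fun row =>
      match PySem.List.pyIdx? row.length i_site with
      | some j => row.modify j (· + 1)
      | none => row)
  | none => freq

-- body of A's inner `for w in keyword_dict[site_name]` loop; state = (freq_list, word_vector)
def faBody (n i_site : Nat) (st : List (List Int) × List String) (w : String) :
    List (List Int) × List String :=
  if ¬ (w ∈ st.2) then
    (faBump (st.1 ++ [List.replicate n 0]) (-1) (i_site : Int), st.2 ++ [w])
  else
    (faBump st.1 (((PySem.List.index? st.2 w).getD 0 : Nat) : Int) (i_site : Int), st.2)

def find_freq_keywords (keyword_dict : List (String × List String)) :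
    List (List Int) × List String :=
  let d := PySem.Dict.ofList keyword_dict
  let site_keys := d.keys
  (List.range site_keys.length).foldl
    (fun st i_site => (d.getD (site_keys.getD i_site "") []).foldl (faBody site_keys.length i_site) st)
    ([], [])

-- ===== PORT B =====
-- body of B's inner loop; state = (word_vector, table : word -> {site_index: count})
def fbBody (i : Int) (st : List String × PySem.Dict String (PySem.Dict Int Int)) (w : String) :
    List String × PySem.Dict String (PySem.Dict Int Int) :=
  let st' := if ¬ st.2.contains w then (st.1 ++ [w], st.2.insert w PySem.Dict.empty) else st
  let inner := st'.2.getD w PySem.Dict.empty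
  (st'.1, st'.2.insert w (inner.insert i (inner.getD i 0 + 1)))

def find_freq_keywords_alt (keyword_dict : List (String × List String)) :
    List (List Int) × List String :=
  let d := PySem.Dict.ofList keyword_dict
  let site_keys := d.keys
  let n := site_keys.length
  let res := (PySem.List.enumerate site_keys).foldl
    (fun st p => (d.getD p.2 []).foldl (fbBody p.1) st) ([], PySem.Dict.empty)
  (res.1.map (fun w => (List.range n).map
      (fun (i : Nat) => ((res.2.getD w PySem.Dict.empty).getD (i : Int) 0))), res.1)

-- ===== PRECONDITION & SPEC =====
def Spec_find_freq_keywords (keyword_dict : List (String × List String)) (out : List (List Int) × List String) : Prop := out = find_freq_keywords_alt keyword_dict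
instance (keyword_dict : List (String × List String)) (out : List (List Int) × List String) : Decidable (Spec_find_freq_keywords keyword_dict out) := by unfold Spec_find_freq_keywords; infer_instance

-- ===== CLAIM (what is proved, stated in full; the proofs are below) =====
def Claim_equal_find_freq_keywords : Prop := ∀ (keyword_dict : List (String × List String)), Dom_find_freq_keywords keyword_dict → Spec_find_freq_keywords keyword_dict (find_freq_keywords keyword_dict)

-- ===== LEMMAS AND PROOFS =====

-- the densified matrix B finally materialises
def densify (t : PySem.Dict String (PySem.Dict Int Int)) (wv : List String) (n : Nat) :
    List (List Int) :=
  wv.map (fun w => (List.range n).map (fun (i : Nat) => ((t.getD w PySem.Dict.empty).getD (i : Int) 0)))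

-- loop invariant relating A's state to B's state
def PVRel (n : Nat) (a : List (List Int) × List String)
    (b : List String × PySem.Dict String (PySem.Dict Int Int)) : Prop :=
  b.1.Nodup ∧ b.2.keys = b.1 ∧ a = (densify b.2 b.1 n, b.1)

theorem modify_append_last {α : Type} (xs : List α) (r : α) (f : α → α) :
    (xs ++ [r]).modify xs.length f = xs ++ [f r] := by
  induction xs with
  | nil => simp [List.modify]
  | cons x xs ih => simpa [List.modify] using ih

theorem row_upd (n i : Nat) (inner : PySem.Dict Int Int) :
    (List.range n).map (fun (j : Nat) => ((inner.insert (i : Int) (inner.getD (i : Int) 0 + 1)).getD (j : Int) 0))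
      = ((List.range n).map (fun (j : Nat) => inner.getD (j : Int) 0)).modify i (· + 1) := by
  apply List.ext_getElem
  · simp
  · intro j h1 h2
    simp only [List.getElem_modify, List.getElem_map, List.getElem_range, PySem.Dict.getD_insert]
    by_cases h : i = j
    · subst h; simp
    · have h' : ¬ ((j : Int) = (i : Int)) := by omega
      simp [h, h']

theorem row_empty (n : Nat) :
    (List.range n).map (fun (j : Nat) => ((PySem.Dict.empty : PySem.Dict Int Int).getD (j : Int) 0))
      = List.replicate n (0 : Int) := by
  simp [PySem.Dict.getD_empty, List.map_const']

theorem enum_eq {α : Type} (xs : List α) (dflt : α) :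
    ∀ k : Int, PySem.List.enumerate xs k
      = (List.range xs.length).map (fun (j : Nat) => ((k + (j : Int), xs.getD j dflt) : Int × α)) := by
  induction xs with
  | nil => intro k; simp [PySem.List.enumerate]
  | cons x xs ih =>
      intro k
      rw [PySem.List.enumerate, ih (k + 1)]
      simp only [List.length_cons, List.range_succ_eq_map, List.map_cons, List.map_map]
      congr 1
      · simp
      · apply List.map_congr_left
        intro j hj
        simp only [Function.comp_apply, List.getD_cons_succ]
        refine Prod.ext ?_ rfl
        push_cast
        ring

theorem body_rel (n i : Nat) (hi : i < n) (a : List (List Int) × List String)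
    (b : List String × PySem.Dict String (PySem.Dict Int Int)) (w : String)
    (h : PVRel n a b) : PVRel n (faBody n i a w) (fbBody (i : Int) b w) := by
  obtain ⟨wv, t⟩ := b
  obtain ⟨hnd, hk, ha⟩ := h
  simp only at hnd hk
  subst ha
  have hct : t.contains w = true ↔ w ∈ wv := by
    rw [PySem.Dict.contains_iff_mem_keys, hk]
  by_cases hw : w ∈ wv
  · -- w already seen
    have hc : t.contains w = true := hct.mpr hw
    obtain ⟨k, hkidx⟩ := Option.isSome_iff_exists.mp ((PySem.List.index?_isSome_iff wv w).mpr hw)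
    obtain ⟨pre, suf, hsplit, hlen, hpre⟩ := (PySem.List.index?_eq_some_iff wv w k).mp hkidx
    have hklt : k < wv.length := by subst hsplit; simp; omega
    have hgetk : wv[k]'hklt = w := by
      subst hsplit; subst hlen
      simp [List.getElem_append_right (le_refl pre.length)]
    simp only [faBody, fbBody, hw, not_true_eq_false, if_false, hc, hkidx, Option.getD_some]
    refine ⟨hnd, ?_, ?_⟩
    · simpa [PySem.Dict.keys_insert_of_contains t _ hc] using hk
    · refine Prod.ext ?_ rfl
      have hidx : PySem.List.pyIdx? (densify t wv n).length (k : Int) = some k := by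
        simp [PySem.List.pyIdx?, densify]; omega
      have hidx2 : PySem.List.pyIdx? n (i : Int) = some i := by
        simp [PySem.List.pyIdx?]; omega
      simp only [faBump, hidx]
      apply List.ext_getElem
      · simp [densify]
      · intro j h1 h2
        have hjlt : j < wv.length := by simpa [densify] using h1
        simp only [densify, List.getElem_modify, List.getElem_map]
        by_cases hj : k = j
        · subst hj
          rw [if_pos rfl, hgetk]
          simp only [List.length_map, List.length_range, hidx2,
            PySem.Dict.getD_insert_self]
          exact (row_upd n i (t.getD w PySem.Dict.empty)).symm
        · rw [if_neg hj]
          have hne : wv[j]'hjlt ≠ w := by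
            intro hcontra
            exact hj ((hnd.getElem_inj_iff).mp (hgetk.trans hcontra.symm))
          simp [PySem.Dict.getD_insert_of_ne _ _ _ hne]
  · -- w is new
    have hc : t.contains w = false := by
      rw [← Bool.not_eq_true]; simpa [hct] using hw
    simp only [faBody, fbBody, hw, not_false_eq_true, if_true, hc, Bool.false_eq_true,
      PySem.Dict.getD_insert_self, PySem.Dict.insert_insert_self]
    refine ⟨?_, ?_, ?_⟩
    · simp only [List.nodup_append, hnd, List.nodup_singleton, true_and]
      intro a ha b hb
      simp only [List.mem_singleton] at hb
      subst hb
      exact fun h => hw (h ▸ ha)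
    · show (t.insert w _).keys = wv ++ [w]
      rw [PySem.Dict.keys_insert_of_not_contains t _ hc, hk]
    · refine Prod.ext ?_ rfl
      have hidxneg : PySem.List.pyIdx? ((densify t wv n ++ [List.replicate n (0 : Int)]).length) (-1)
          = some ((densify t wv n).length) := by
        simp [PySem.List.pyIdx?, densify]
      have hidx2 : PySem.List.pyIdx? n (i : Int) = some i := by
        simp [PySem.List.pyIdx?]; omega
      simp only [faBump, hidxneg, modify_append_last, List.length_replicate, hidx2]
      simp only [densify, List.map_append, List.map_singleton, PySem.Dict.getD_insert_self]
      congr 1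
      · apply List.map_congr_left
        intro w' hw'
        have hne : w' ≠ w := fun hcontra => hw (hcontra ▸ hw')
        rw [PySem.Dict.getD_insert_of_ne _ _ _ hne]
      · rw [row_upd n i PySem.Dict.empty, row_empty]

theorem fold_words (n i : Nat) (hi : i < n) (ws : List String) :
    ∀ a b, PVRel n a b → PVRel n (ws.foldl (faBody n i) a) (ws.foldl (fbBody (i : Int)) b) := by
  induction ws with
  | nil => intro a b h; simpa using h
  | cons w ws ih =>
      intro a b h
      simpa using ih _ _ (body_rel n i hi a b w h)

theorem fold_sites (n : Nat) (g : Nat → List String) :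
    ∀ (L : List Nat) a b, (∀ i ∈ L, i < n) → PVRel n a b →
      PVRel n (L.foldl (fun st i => (g i).foldl (faBody n i) st) a)
            (L.foldl (fun st i => (g i).foldl (fbBody (i : Int)) st) b) := by
  intro L
  induction L with
  | nil => intro a b _ h; simpa using h
  | cons i L ih =>
      intro a b hL h
      simp only [List.foldl_cons]
      exact ih _ _ (fun j hj => hL j (List.mem_cons_of_mem _ hj))
        (fold_words n i (hL i (List.mem_cons_self)) _ _ _ h)

-- ===== VERDICT (by name: the statement is the Claim_ definition above) =====
theorem find_freq_keywords_spec : Claim_equal_find_freq_keywords := by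
  intro kd _
  unfold Spec_find_freq_keywords find_freq_keywords find_freq_keywords_alt
  simp only
  rw [enum_eq (PySem.Dict.ofList kd : PySem.Dict String (List String)).keys "" 0,
    List.foldl_map]
  simp only [zero_add]
  obtain ⟨h1, h2, h3⟩ := fold_sites
    ((PySem.Dict.ofList kd : PySem.Dict String (List String)).keys.length)
    (fun i => (PySem.Dict.ofList kd : PySem.Dict String (List String)).getD
      ((PySem.Dict.ofList kd : PySem.Dict String (List String)).keys.getD i "") [])
    (List.range (PySem.Dict.ofList kd : PySem.Dict String (List String)).keys.length)
    ([], []) ([], PySem.Dict.empty)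
    (fun i hi => List.mem_range.mp hi)
    ⟨List.nodup_nil, PySem.Dict.keys_empty, by simp [densify]⟩
  rw [h3]
  rfl
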